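-- pv_equiv track=rewrite | github.com/min-mwei/Laika | src/model_playground/laika_poc.py | _count_anchor_matches
-- ===== SOURCE A (Python) =====
-- from typing import Any, Callable, Dict, Iterable, List, Optional, Tuple
--
-- def _normalize_for_match(text: str) -> str:
--     lower = text.lower()
--     cleaned = []
--     for ch in lower:
--         cleaned.append(ch if ch.isalnum() else " ")
--     return " ".join("".join(cleaned).split())
--
-- def _count_anchor_matches(summary: str, anchors: List[str]) -> int:
--     normalized_summary = _normalize_for_match(summary)
--     count = 0
--     for anchor in anchors:
--         normalized_anchor = _normalize_for_match(anchor)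
--         if not normalized_anchor:
--             continue
--         if normalized_anchor in normalized_summary:
--             count += 1
--             continue
--         tokens = normalized_anchor.split()
--         if len(tokens) >= 3:
--             prefix = " ".join(tokens[:6])
--             if prefix in normalized_summary:
--                 count += 1
--     return count
-- ===== SOURCE B (Python) =====
-- def _tokens(text):
--     """Lowercased alphanumeric runs of text, collected in one pass."""
--     toks = []
--     cur = []
--     for ch in text.lower():
--         if ch.isalnum():
--             cur.append(ch)
--         elif cur:
--             toks.append("".join(cur))
--             cur = []
--     if cur:
--         toks.append("".join(cur))
--     return toks
--
--
-- def _count_anchor_matches(summary, anchors):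
--     # Per anchor the needle is the first-6-token join of its normalization.
--     # A full-anchor match implies a needle match (the needle is a prefix of
--     # the full anchor, and anchors of <= 6 tokens ARE their needle), so A's
--     # branch cascade reduces to one substring test per needle.  Instead of
--     # scanning the summary once per anchor, build a hash-set index of all
--     # summary substrings at the needle lengths that actually occur, then
--     # answer each anchor by a single set lookup.
--     ns = " ".join(_tokens(summary))
--     needles = [" ".join(_tokens(a)[:6]) for a in anchors]
--     subs = set()
--     for L in dict.fromkeys(len(p) for p in needles if p):
--         for i in range(len(ns) - L + 1):
--             subs.add(ns[i:i + L])
--     return sum(1 for p in needles if p and p in subs)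
-- ===== Notes on version B (the rewrite author's own statement) =====
-- stated objective: faster
-- what changed: B reduces A's three-branch cascade to one first-6-token needle test per anchor (the needle is a prefix of the full normalized anchor, so a full match implies a needle match, and anchors of <=6 tokens equal their needle), and replaces A's per-anchor substring scans of the summary by a hash-set index of the summary's substrings at the occurring needle lengths, built once and queried by one O(|needle|) set lookup per anchor; tokenization is a single state-machine pass instead of A's clean/join/split/join round-trips.
import Mathlib
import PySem

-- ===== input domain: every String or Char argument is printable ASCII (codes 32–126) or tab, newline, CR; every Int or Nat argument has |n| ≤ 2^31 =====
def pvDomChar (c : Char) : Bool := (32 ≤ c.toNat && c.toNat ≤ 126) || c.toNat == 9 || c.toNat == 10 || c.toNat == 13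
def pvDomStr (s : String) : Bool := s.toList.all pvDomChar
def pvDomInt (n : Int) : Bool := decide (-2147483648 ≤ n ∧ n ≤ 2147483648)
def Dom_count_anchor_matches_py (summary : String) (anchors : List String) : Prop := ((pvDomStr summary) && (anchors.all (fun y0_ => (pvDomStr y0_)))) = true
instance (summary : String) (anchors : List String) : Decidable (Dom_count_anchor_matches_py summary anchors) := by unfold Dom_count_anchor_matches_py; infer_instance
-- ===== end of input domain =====

-- B replaces A's per-anchor substring scans of the summary (plus a three-branch cascade) by a
-- substring index: one hash-set of all summary substrings at the needle lengths that occur,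
-- built once, then one set lookup per anchor (objective: faster; measured).

-- ===== PORT A =====
-- port of _normalize_for_match (strings kept as List Char; exact via PySem.Chars)
def pvNormalizeA (text : String) : List Char :=
  let lower := PySem.Chars.lower text.toList
  let cleaned := lower.foldl (fun acc ch => acc ++ [if PySem.Chars.isalnum ch then ch else ' ']) ([] : List Char)
  PySem.Chars.join [' '] (PySem.Chars.split₀ cleaned)

def count_anchor_matches_py (summary : String) (anchors : List String) : Int :=
  let normalizedSummary := pvNormalizeA summary
  anchors.foldl (fun count anchor =>
    let normalizedAnchor := pvNormalizeA anchor
    if normalizedAnchor.isEmpty then count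
    else if PySem.Chars.isIn normalizedAnchor normalizedSummary then count + 1
    else
      let tokens := PySem.Chars.split₀ normalizedAnchor
      if 3 ≤ tokens.length then
        let pre := PySem.Chars.join [' '] (PySem.List.slice tokens none (some 6))
        if PySem.Chars.isIn pre normalizedSummary then count + 1 else count
      else count) 0

-- ===== PORT B =====
-- port of Source B's _tokens: one pass, state (finished tokens, current run)
def pvTokStep (st : List (List Char) × List Char) (ch : Char) : List (List Char) × List Char :=
  if PySem.Chars.isalnum ch then (st.1, st.2 ++ [ch])
  else if st.2.isEmpty then st
  else (st.1 ++ [st.2], [])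

def pvTokens (text : String) : List (List Char) :=
  let st := (PySem.Chars.lower text.toList).foldl pvTokStep ([], [])
  if st.2.isEmpty then st.1 else st.1 ++ [st.2]

-- " ".join(_tokens(a)[:6])
def pvNeedle (a : String) : List Char :=
  PySem.Chars.join [' '] (PySem.List.slice (pvTokens a) none (some 6))

def count_anchor_matches_py_alt (summary : String) (anchors : List String) : Int :=
  let ns := PySem.Chars.join [' '] (pvTokens summary)
  let needles := anchors.map pvNeedle
  let lengths := PySem.List.dedup ((needles.filter (fun p => !p.isEmpty)).map List.length)
  let subs := lengths.foldl (fun s (L : Nat) =>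
      (PySem.List.pyRange 0 ((ns.length : Int) - (L : Int) + 1) 1).foldl
        (fun s i => PySem.Set.add s (PySem.List.slice ns (some i) (some (i + (L : Int))))) s)
    (PySem.Set.empty)
  ((needles.countP (fun p => !p.isEmpty && PySem.Set.contains subs p) : Nat) : Int)

-- ===== PRECONDITION & SPEC =====
def Spec_count_anchor_matches_py (summary : String) (anchors : List String) (out : Int) : Prop := out = count_anchor_matches_py_alt summary anchors
instance (summary : String) (anchors : List String) (out : Int) : Decidable (Spec_count_anchor_matches_py summary anchors out) := by unfold Spec_count_anchor_matches_py; infer_instance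

-- ===== CLAIM (what is proved, stated in full; the proofs are below) =====
def Claim_equal_count_anchor_matches_py : Prop := ∀ (summary : String) (anchors : List String), Dom_count_anchor_matches_py summary anchors → Spec_count_anchor_matches_py summary anchors (count_anchor_matches_py summary anchors)

-- ===== LEMMAS AND PROOFS =====

-- the cleaning map of A's normalize
def pvClean (c : Char) : Char := if PySem.Chars.isalnum c then c else ' '

lemma pv_isspace_of_isalnum (c : Char) (h : PySem.Chars.isalnum c = true) :
    PySem.Chars.isspace c = false := by
  have e1 : 'A'.val.toNat = 65 := rfl
  have e2 : 'Z'.val.toNat = 90 := rfl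
  have e3 : 'a'.val.toNat = 97 := rfl
  have e4 : 'z'.val.toNat = 122 := rfl
  have e5 : '0'.val.toNat = 48 := rfl
  have e6 : '9'.val.toNat = 57 := rfl
  simp only [PySem.Chars.isalnum, PySem.Chars.isalpha, PySem.Chars.isupper, PySem.Chars.islower,
    PySem.Chars.isdigit, Char.le_def, UInt32.le_iff_toNat_le, e1, e2, e3, e4, e5, e6,
    Bool.or_eq_true, Bool.and_eq_true, decide_eq_true_eq] at h
  simp only [PySem.Chars.isspace, Char.toNat, Bool.or_eq_false_iff, Bool.and_eq_false_iff,
    decide_eq_false_iff_not]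
  omega

lemma pv_isspace_space : PySem.Chars.isspace ' ' = true := by decide

-- the state-machine tokenizer equals split₀ ∘ map pvClean
lemma pv_go_eq_fold (cs : List Char) : ∀ (toks : List (List Char)) (cur : List Char),
    PySem.Chars.split₀.go (cs.map pvClean) cur.reverse toks.reverse
      = (let st := cs.foldl pvTokStep (toks, cur); if st.2.isEmpty then st.1 else st.1 ++ [st.2]) := by
  induction cs with
  | nil =>
    intro toks cur
    simp only [List.map_nil, PySem.Chars.split₀.go, List.foldl_nil, List.isEmpty_iff,
      List.reverse_eq_nil_iff]
    by_cases h : cur = [] <;> simp [h]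
  | cons c rest ih =>
    intro toks cur
    simp only [List.map_cons, List.foldl_cons]
    by_cases ha : PySem.Chars.isalnum c = true
    · have hs := pv_isspace_of_isalnum c ha
      rw [show pvClean c = c from by simp [pvClean, ha]]
      simp only [PySem.Chars.split₀.go, hs, Bool.false_eq_true, if_false]
      rw [show pvTokStep (toks, cur) c = (toks, cur ++ [c]) from by simp [pvTokStep, ha]]
      have h2 := ih toks (cur ++ [c])
      simp only [List.reverse_append, List.reverse_cons, List.reverse_nil, List.nil_append,
        List.singleton_append] at h2
      exact h2
    · rw [show pvClean c = ' ' from by simp [pvClean, ha]]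
      simp only [PySem.Chars.split₀.go, pv_isspace_space, if_true]
      by_cases hc : cur = []
      · subst hc
        simp only [List.reverse_nil, List.isEmpty_nil, if_pos]
        rw [show pvTokStep (toks, ([] : List Char)) c = (toks, []) from by simp [pvTokStep, ha]]
        simpa using ih toks []
      · rw [if_neg (by simp [List.isEmpty_iff, hc])]
        rw [show pvTokStep (toks, cur) c = (toks ++ [cur], []) from by
          simp [pvTokStep, ha, List.isEmpty_iff, hc]]
        have h2 := ih (toks ++ [cur]) []
        simp only [List.reverse_nil, List.reverse_append, List.reverse_cons, List.nil_append,
          List.singleton_append] at h2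
        rw [List.reverse_reverse]
        exact h2

lemma pv_tokens_eq_split (text : String) :
    pvTokens text = PySem.Chars.split₀ ((PySem.Chars.lower text.toList).map pvClean) := by
  have := pv_go_eq_fold (PySem.Chars.lower text.toList) [] []
  simp only [List.reverse_nil] at this
  rw [pvTokens, PySem.Chars.split₀, this]

-- A's cleaned list is map pvClean
lemma pv_normalizeA_eq (text : String) :
    pvNormalizeA text = PySem.Chars.join [' '] (pvTokens text) := by
  rw [pvNormalizeA, pv_tokens_eq_split]
  rw [show (fun (acc : List Char) ch => acc ++ [if PySem.Chars.isalnum ch then ch else ' '])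
      = (fun acc x => acc ++ [pvClean x]) from rfl]
  rw [PySem.List.foldl_append_singleton_eq_map]
  simp

-- tokenizer invariant: every produced token is a nonempty list of alnum chars
def pvGoodTok (t : List Char) : Prop := t ≠ [] ∧ ∀ c ∈ t, PySem.Chars.isalnum c = true

lemma pv_tokens_good (text : String) : ∀ t ∈ pvTokens text, pvGoodTok t := by
  rw [pvTokens]
  have key : ∀ (cs : List Char) (toks : List (List Char)) (cur : List Char),
      (∀ t ∈ toks, pvGoodTok t) → (∀ c ∈ cur, PySem.Chars.isalnum c = true) →
      ∀ t ∈ (let st := cs.foldl pvTokStep (toks, cur);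
             if st.2.isEmpty then st.1 else st.1 ++ [st.2]), pvGoodTok t := by
    intro cs
    induction cs with
    | nil =>
      intro toks cur htoks hcur
      simp only [List.foldl_nil]
      by_cases hc : cur = []
      · simpa [hc] using htoks
      · simp only [List.isEmpty_iff, hc, if_false]
        intro t ht
        rcases List.mem_append.1 ht with h | h
        · exact htoks t h
        · simp only [List.mem_singleton] at h; subst h; exact ⟨hc, hcur⟩
    | cons c rest ih =>
      intro toks cur htoks hcur
      simp only [List.foldl_cons]
      by_cases ha : PySem.Chars.isalnum c = true
      · rw [show pvTokStep (toks, cur) c = (toks, cur ++ [c]) from by simp [pvTokStep, ha]]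
        exact ih toks (cur ++ [c]) htoks (by
          intro x hx
          rcases List.mem_append.1 hx with h | h
          · exact hcur x h
          · simp only [List.mem_singleton] at h; subst h; exact ha)
      · by_cases hc : cur = []
        · rw [show pvTokStep (toks, cur) c = (toks, cur) from by
            simp [pvTokStep, ha, hc]]
          exact ih toks cur htoks hcur
        · rw [show pvTokStep (toks, cur) c = (toks ++ [cur], []) from by
            simp [pvTokStep, ha, List.isEmpty_iff, hc]]
          exact ih (toks ++ [cur]) [] (by
            intro t ht
            rcases List.mem_append.1 ht with h | h
            · exact htoks t h
            · simp only [List.mem_singleton] at h; subst h; exact ⟨hc, hcur⟩) (by simp)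
  exact key _ [] [] (by simp) (by simp)

-- join of good tokens is empty iff there are none
lemma pv_join_ne_nil {toks : List (List Char)} (h : ∀ t ∈ toks, pvGoodTok t) (hne : toks ≠ []) :
    PySem.Chars.join [' '] toks ≠ [] := by
  cases toks with
  | nil => exact absurd rfl hne
  | cons t rest =>
    have ht := (h t (by simp)).1
    cases rest with
    | nil => rw [PySem.Chars.join_singleton]; exact ht
    | cons u r =>
      rw [PySem.Chars.join_cons_cons]
      intro hcon
      exact ht (List.append_eq_nil_iff.1 ((List.append_eq_nil_iff.1 hcon).1)).1

-- join over an append of token lists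
lemma pv_join_append (xs ys : List (List Char)) (hxs : xs ≠ []) (hys : ys ≠ []) :
    PySem.Chars.join [' '] (xs ++ ys)
      = PySem.Chars.join [' '] xs ++ ' ' :: PySem.Chars.join [' '] ys := by
  induction xs with
  | nil => exact absurd rfl hxs
  | cons t rest ih =>
    cases rest with
    | nil =>
      cases ys with
      | nil => exact absurd rfl hys
      | cons u r =>
        simp only [List.singleton_append, PySem.Chars.join_cons_cons, PySem.Chars.join_singleton]
        simp
    | cons u r =>
      simp only [List.cons_append] at ih ⊢
      rw [PySem.Chars.join_cons_cons, PySem.Chars.join_cons_cons, ih (by simp)]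
      simp

-- split₀.go walks straight through a whitespace-free block
lemma pv_go_word (t : List Char) : ∀ (cur : List Char) (acc : List (List Char)) (rest : List Char),
    (∀ c ∈ t, PySem.Chars.isspace c = false) →
    PySem.Chars.split₀.go (t ++ rest) cur acc = PySem.Chars.split₀.go rest (t.reverse ++ cur) acc := by
  induction t with
  | nil => intro cur acc rest _; simp
  | cons c tl ih =>
    intro cur acc rest h
    have hc : PySem.Chars.isspace c = false := h c (by simp)
    simp only [List.cons_append, PySem.Chars.split₀.go, hc, Bool.false_eq_true, if_false]
    rw [ih (c :: cur) acc rest (fun x hx => h x (by simp [hx]))]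
    simp

-- accumulator lemma for split₀.go
lemma pv_go_acc (s : List Char) : ∀ (cur : List Char) (acc : List (List Char)),
    PySem.Chars.split₀.go s cur acc = acc.reverse ++ PySem.Chars.split₀.go s cur [] := by
  induction s with
  | nil =>
    intro cur acc
    by_cases hc : cur = [] <;> simp [PySem.Chars.split₀.go, hc]
  | cons c rest ih =>
    intro cur acc
    by_cases hs : PySem.Chars.isspace c = true
    · by_cases hc : cur = []
      · simp only [PySem.Chars.split₀.go, hs, if_pos, hc, List.isEmpty_nil]
        exact ih [] acc
      · simp only [PySem.Chars.split₀.go, hs, if_pos, List.isEmpty_iff, hc]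
        rw [ih [] (cur.reverse :: acc), ih [] [cur.reverse]]
        simp
    · rw [Bool.not_eq_true] at hs
      simp only [PySem.Chars.split₀.go, hs, Bool.false_eq_true, if_false]
      exact ih (c :: cur) acc

-- round-trip: splitting the space-join of good tokens gives the tokens back
lemma pv_split_join {toks : List (List Char)} (h : ∀ t ∈ toks, pvGoodTok t) :
    PySem.Chars.split₀ (PySem.Chars.join [' '] toks) = toks := by
  induction toks with
  | nil => simp [PySem.Chars.join_nil, PySem.Chars.split₀, PySem.Chars.split₀.go]
  | cons t rest ih =>
    have ht := h t (by simp)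
    have htns : ∀ c ∈ t, PySem.Chars.isspace c = false :=
      fun c hc => pv_isspace_of_isalnum c (ht.2 c hc)
    cases rest with
    | nil =>
      rw [PySem.Chars.join_singleton, PySem.Chars.split₀]
      rw [show t = t ++ [] from (List.append_nil t).symm, pv_go_word t [] [] [] htns]
      simp only [PySem.Chars.split₀.go, List.append_nil, List.isEmpty_iff,
        List.reverse_eq_nil_iff]
      rw [if_neg ht.1]
      simp
    | cons u r =>
      rw [PySem.Chars.join_cons_cons, PySem.Chars.split₀, List.append_assoc,
        pv_go_word t [] [] _ htns]
      simp only [List.append_nil, List.singleton_append, PySem.Chars.split₀.go, pv_isspace_space,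
        if_pos, List.isEmpty_iff, List.reverse_eq_nil_iff]
      rw [if_neg ht.1, pv_go_acc, List.reverse_reverse]
      have := ih (fun x hx => h x (by simp [hx]))
      rw [PySem.Chars.split₀] at this
      simp [this]

-- a match of the full joined anchor implies a match of its first-6-token needle
lemma pv_isIn_prefix {toks : List (List Char)} {ns : List Char}
    (h : ∀ t ∈ toks, pvGoodTok t)
    (hfull : PySem.Chars.isIn (PySem.Chars.join [' '] toks) ns = true) :
    PySem.Chars.isIn (PySem.Chars.join [' '] (toks.take 6)) ns = true := by
  by_cases hlen : toks.length ≤ 6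
  · rwa [List.take_of_length_le hlen]
  · have hsplit : toks = toks.take 6 ++ toks.drop 6 := (List.take_append_drop 6 toks).symm
    have htake : toks.take 6 ≠ [] := by
      simp only [ne_eq, List.take_eq_nil_iff]
      push_neg
      exact ⟨by omega, by intro hc; subst hc; simp at hlen⟩
    have hdrop : toks.drop 6 ≠ [] := by
      simp only [ne_eq, List.drop_eq_nil_iff]
      omega
    rw [PySem.Chars.isIn_iff_infix] at hfull ⊢
    have : PySem.Chars.join [' '] toks
        = PySem.Chars.join [' '] (toks.take 6) ++ ' ' :: PySem.Chars.join [' '] (toks.drop 6) := by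
      conv_lhs => rw [hsplit]
      exact pv_join_append _ _ htake hdrop
    rw [this] at hfull
    exact List.IsInfix.trans ⟨[], ' ' :: PySem.Chars.join [' '] (toks.drop 6), by simp⟩ hfull

-- per-anchor: A's branch cascade equals the single needle test
lemma pv_anchor_step (anchor : String) (ns : List Char) (count : Int) :
    (if (PySem.Chars.join [' '] (pvTokens anchor)).isEmpty then count
     else if PySem.Chars.isIn (PySem.Chars.join [' '] (pvTokens anchor)) ns then count + 1
     else if 3 ≤ (PySem.Chars.split₀ (PySem.Chars.join [' '] (pvTokens anchor))).length then
       if PySem.Chars.isIn (PySem.Chars.join [' ']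
           (PySem.List.slice (PySem.Chars.split₀ (PySem.Chars.join [' '] (pvTokens anchor))) none (some 6))) ns
       then count + 1 else count
     else count)
    = count + (if (!(pvTokens anchor).isEmpty && PySem.Chars.isIn (pvNeedle anchor) ns) then 1 else 0) := by
  have hgood := pv_tokens_good anchor
  rw [pvNeedle]
  set toks := pvTokens anchor with htoks
  by_cases hnil : toks = []
  · simp [hnil, PySem.Chars.join_nil]
  · have hne : PySem.Chars.join [' '] toks ≠ [] := pv_join_ne_nil hgood hnil
    rw [pv_split_join hgood]
    rw [PySem.List.slice_to toks (by norm_num)]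
    rw [show Int.toNat 6 = 6 from rfl]
    simp only [List.isEmpty_iff, hne, if_false, Bool.and_eq_true]
    by_cases hin : PySem.Chars.isIn (PySem.Chars.join [' '] toks) ns = true
    · have hpre := pv_isIn_prefix hgood hin
      simp [hin, hpre, hnil]
    · by_cases hlen : 3 ≤ toks.length
      · simp only [hin, Bool.false_eq_true, if_false, hlen, if_pos]
        split <;> simp_all
      · have h6 : toks.length ≤ 6 := by omega
        rw [List.take_of_length_le h6]
        simp [hin, hlen, hnil]

-- fold of per-anchor 0/1 increments is countP
lemma pv_fold_count (p : String → Bool) (anchors : List String) :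
    ∀ (count : Int),
    anchors.foldl (fun c a => c + (if p a then 1 else 0)) count = count + (anchors.countP p : Nat) := by
  induction anchors with
  | nil => intro count; simp
  | cons a rest ih =>
    intro count
    simp only [List.foldl_cons, List.countP_cons, ih]
    by_cases h : p a = true
    · simp [h]
      omega
    · simp [h]

-- B-SIDE: characterisation of the substring index --------------------------------------------

-- infix of ns = some take-of-drop window of ns
lemma pv_infix_iff (p ns : List Char) :
    p <:+: ns ↔ ∃ j : Nat, j + p.length ≤ ns.length ∧ p = (ns.drop j).take p.length := by
  constructor
  · rintro ⟨s, t, rfl⟩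
    refine ⟨s.length, by simp, ?_⟩
    rw [List.append_assoc, List.drop_left, List.take_left]
  · rintro ⟨j, _, hp⟩
    rw [hp]
    exact List.IsInfix.trans (List.take_prefix _ _).isInfix (List.drop_suffix _ _).isInfix

-- membership in the inner window-adding fold for one length
lemma pv_mem_inner (ns : List Char) (L : Nat) (s : PySem.Set (List Char)) (x : List Char) :
    (x ∈ (PySem.List.pyRange 0 ((ns.length : Int) - (L : Int) + 1) 1).foldl
        (fun s i => PySem.Set.add s (PySem.List.slice ns (some i) (some (i + (L : Int))))) s)
    ↔ x ∈ s ∨ ∃ j : Nat, j + L ≤ ns.length ∧ x = (ns.drop j).take L := by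
  rw [PySem.Set.mem_foldl_add]
  constructor
  · rintro (hx | ⟨i, hi, hx⟩)
    · exact Or.inl hx
    · rw [PySem.List.mem_pyRange_one] at hi
      refine Or.inr ⟨i.toNat, by omega, ?_⟩
      rw [hx, PySem.List.slice_toNat ns hi.1 (by omega),
        show ((i + (L : Int)).toNat - i.toNat) = L from by omega]
  · rintro (hx | ⟨j, hj, hx⟩)
    · exact Or.inl hx
    · refine Or.inr ⟨(j : Int), ?_, ?_⟩
      · rw [PySem.List.mem_pyRange_one]; omega
      · rw [hx, PySem.List.slice_toNat ns (by omega) (by omega),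
          show (((j : Int) + (L : Int)).toNat - (j : Int).toNat) = L from by omega,
          show ((j : Int)).toNat = j from by omega]

-- membership in the whole index
lemma pv_mem_subs (ns : List Char) (lengths : List Nat) (x : List Char) :
    (x ∈ lengths.foldl (fun s (L : Nat) =>
        (PySem.List.pyRange 0 ((ns.length : Int) - (L : Int) + 1) 1).foldl
          (fun s i => PySem.Set.add s (PySem.List.slice ns (some i) (some (i + (L : Int))))) s)
      (PySem.Set.empty))
    ↔ ∃ L ∈ lengths, ∃ j : Nat, j + L ≤ ns.length ∧ x = (ns.drop j).take L := by
  have key : ∀ (ls : List Nat) (s : PySem.Set (List Char)),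
      (x ∈ ls.foldl (fun s (L : Nat) =>
          (PySem.List.pyRange 0 ((ns.length : Int) - (L : Int) + 1) 1).foldl
            (fun s i => PySem.Set.add s (PySem.List.slice ns (some i) (some (i + (L : Int))))) s) s)
      ↔ x ∈ s ∨ ∃ L ∈ ls, ∃ j : Nat, j + L ≤ ns.length ∧ x = (ns.drop j).take L := by
    intro ls
    induction ls with
    | nil => intro s; simp
    | cons L rest ih =>
      intro s
      rw [List.foldl_cons, ih, pv_mem_inner]
      constructor
      · rintro ((hx | ⟨j, hj, hx⟩) | ⟨M, hM, j, hj, hx⟩)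
        · exact Or.inl hx
        · exact Or.inr ⟨L, by simp, j, hj, hx⟩
        · exact Or.inr ⟨M, by simp [hM], j, hj, hx⟩
      · rintro (hx | ⟨M, hM, j, hj, hx⟩)
        · exact Or.inl (Or.inl hx)
        · rcases List.mem_cons.1 hM with rfl | hM
          · exact Or.inl (Or.inr ⟨j, hj, hx⟩)
          · exact Or.inr ⟨M, hM, j, hj, hx⟩
  rw [key]
  simp [PySem.Set.empty]

-- an index lookup of a registered-length needle IS the substring test
lemma pv_contains_eq_isIn (ns p : List Char) (lengths : List Nat)
    (hlen : p.length ∈ lengths) :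
    PySem.Set.contains (lengths.foldl (fun s (L : Nat) =>
        (PySem.List.pyRange 0 ((ns.length : Int) - (L : Int) + 1) 1).foldl
          (fun s i => PySem.Set.add s (PySem.List.slice ns (some i) (some (i + (L : Int))))) s)
      (PySem.Set.empty)) p
    = PySem.Chars.isIn p ns := by
  apply Bool.coe_iff_coe.mp
  rw [PySem.Set.contains_iff, PySem.Chars.isIn_iff_infix, pv_mem_subs, pv_infix_iff]
  constructor
  · rintro ⟨L, _, j, hj, hx⟩
    have hL : p.length = L := by
      rw [hx, List.length_take, List.length_drop]
      omega
    exact ⟨j, by omega, by rw [hL]; exact hx⟩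
  · rintro ⟨j, hj, hx⟩
    exact ⟨p.length, hlen, j, hj, hx⟩

-- the needle is empty exactly when the anchor has no tokens
lemma pv_needle_isEmpty (a : String) : (pvNeedle a).isEmpty = (pvTokens a).isEmpty := by
  rw [pvNeedle, PySem.List.slice_to _ (by norm_num), show Int.toNat 6 = 6 from rfl]
  by_cases h : pvTokens a = []
  · simp [h, PySem.Chars.join_nil]
  · have htake : (pvTokens a).take 6 ≠ [] := by
      simp only [ne_eq, List.take_eq_nil_iff]
      push_neg
      exact ⟨by omega, h⟩
    have : PySem.Chars.join [' '] ((pvTokens a).take 6) ≠ [] :=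
      pv_join_ne_nil (fun t ht => pv_tokens_good a t (List.mem_of_mem_take ht)) htake
    apply Bool.coe_iff_coe.mp
    simp [List.isEmpty_iff, this, h]

-- ===== VERDICT (by name: the statement is the Claim_ definition above) =====

theorem count_anchor_matches_py_spec : Claim_equal_count_anchor_matches_py := by
  intro summary anchors _
  show count_anchor_matches_py summary anchors = count_anchor_matches_py_alt summary anchors
  rw [count_anchor_matches_py, count_anchor_matches_py_alt]
  simp only [pv_normalizeA_eq]
  set ns := PySem.Chars.join [' '] (pvTokens summary) with hns
  -- A's loop = count of anchors whose needle occurs in ns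
  rw [PySem.List.foldl_congr_mem anchors _
    (fun (count : Int) (anchor : String) => count +
      (if (!(pvTokens anchor).isEmpty && PySem.Chars.isIn (pvNeedle anchor) ns) then 1 else 0)) 0
    (fun count anchor _ => pv_anchor_step anchor ns count)]
  rw [pv_fold_count, zero_add, List.countP_map]
  -- B's staged computation = the same count
  congr 1
  apply List.countP_congr
  intro a ha
  simp only [Function.comp_apply]
  rw [pv_needle_isEmpty]
  by_cases h : (pvTokens a).isEmpty
  · simp [h]
  · have hmem : (pvNeedle a).length ∈
        PySem.List.dedup (((anchors.map pvNeedle).filter (fun p => !p.isEmpty)).map List.length) := by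
      rw [PySem.List.mem_dedup]
      exact List.mem_map_of_mem (List.mem_filter.2
        ⟨List.mem_map_of_mem ha, by rw [pv_needle_isEmpty]; simp [h]⟩)
    rw [pv_contains_eq_isIn ns (pvNeedle a) _ hmem]
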